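-- pv_equiv track=rewrite | github.com/dinuhifi/advent-of-code-2023 | py/day_00.py | convert_to_num
-- ===== SOURCE A (Python) =====
-- def convert_to_num(input):
--     ans = []
--     str_to_nums = {'one': '1','two': '2','three': '3','four': '4','five': '5',
--                    'six': '6','seven': '7','eight': '8','nine': '9'}
--
--     for j in range(len(input)):
--         for i in str_to_nums.keys():
--             l = len(i)
--             if input[j:j+l] == i:
--                 ans.append(int(str_to_nums[i]))
--
--     return ans
-- ===== SOURCE B (Python) =====
-- def convert_to_num(input):
--     table = [('one', 1), ('two', 2), ('three', 3), ('four', 4), ('five', 5),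
--              ('six', 6), ('seven', 7), ('eight', 8), ('nine', 9)]
--     hits = [(j, v) for (w, v) in table for j in range(len(input)) if input.startswith(w, j)]
--     hits.sort(key=lambda p: p[0])
--     return [v for (_, v) in hits]
-- ===== Notes on version B (the rewrite author's own statement) =====
-- stated objective: alternative
-- what changed: Instead of A's position-major scan (for each index try all nine words and append immediately), B collects (index, value) hit pairs word-by-word, sorts them once by index, and returns the values; agreement relies on stable sorting and on no two digit words matching at the same position.
import Mathlib
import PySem

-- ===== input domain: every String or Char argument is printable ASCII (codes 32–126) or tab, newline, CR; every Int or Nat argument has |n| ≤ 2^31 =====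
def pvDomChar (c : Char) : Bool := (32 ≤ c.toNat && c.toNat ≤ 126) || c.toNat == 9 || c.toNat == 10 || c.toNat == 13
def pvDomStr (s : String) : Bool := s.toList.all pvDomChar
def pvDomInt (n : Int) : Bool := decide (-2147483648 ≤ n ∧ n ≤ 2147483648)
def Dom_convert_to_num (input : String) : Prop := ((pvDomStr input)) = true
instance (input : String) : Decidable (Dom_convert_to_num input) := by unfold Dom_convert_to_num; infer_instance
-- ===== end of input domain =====

-- B replaces A's position-major scan by word-major collection of (index, value) hit pairs
-- followed by one stable sort on the index (objective: alternative decomposition, same cost).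

-- ===== PORT A =====
-- the dict str_to_nums, in insertion order
def pvTableA : List (String × String) :=
  [("one", "1"), ("two", "2"), ("three", "3"), ("four", "4"), ("five", "5"),
   ("six", "6"), ("seven", "7"), ("eight", "8"), ("nine", "9")]

def convert_to_num (input : String) : List Int :=
  (PySem.List.pyRange 0 (PySem.Str.len input) 1).foldl
    (fun ans j =>
      pvTableA.foldl
        (fun ans iv =>
          let l : Int := PySem.Str.len iv.1
          -- int(str_to_nums[i]) always succeeds on the digit literals; .getD 0 is unreachable
          if PySem.Str.slice input (some j) (some (j + l)) = iv.1
          then ans ++ [(PySem.Int.ofStr? iv.2).getD 0]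
          else ans)
        ans)
    []

-- ===== PORT B =====
def pvTableB : List (String × Int) :=
  [("one", 1), ("two", 2), ("three", 3), ("four", 4), ("five", 5),
   ("six", 6), ("seven", 7), ("eight", 8), ("nine", 9)]

def convert_to_num_alt (input : String) : List Int :=
  -- input.startswith(w, j) with 0 ≤ j is exactly startswith on the j-suffix
  let hits := pvTableB.flatMap (fun wv =>
    (PySem.List.pyRange 0 (PySem.Str.len input) 1).flatMap (fun j =>
      if PySem.Chars.startswith (input.toList.drop j.toNat) wv.1.toList
      then [(j, wv.2)] else []))
  (PySem.List.sorted hits (fun p => p.1)).map (fun p => p.2)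

-- ===== PRECONDITION & SPEC =====
def Spec_convert_to_num (input : String) (out : List Int) : Prop := out = convert_to_num_alt input
instance (input : String) (out : List Int) : Decidable (Spec_convert_to_num input out) := by unfold Spec_convert_to_num; infer_instance

-- ===== CLAIM (what is proved, stated in full; the proofs are below) =====
def Claim_equal_convert_to_num : Prop := ∀ (input : String), Dom_convert_to_num input → Spec_convert_to_num input (convert_to_num input)

-- ===== LEMMAS AND PROOFS =====

-- one hit candidate: [(j, v)] if word wv matches at position j, else []
def pvG (input : String) (wv : String × Int) (j : Int) : List (Int × Int) :=
  if PySem.Chars.startswith (input.toList.drop j.toNat) wv.1.toList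
  then [(j, wv.2)] else []

-- B's unsorted hit list (word-major)
def pvHits (input : String) : List (Int × Int) :=
  pvTableB.flatMap (fun wv =>
    (PySem.List.pyRange 0 (PySem.Str.len input) 1).flatMap (fun j => pvG input wv j))

-- the same multiset of hits, position-major (= the order A emits values in)
def pvPairsPos (input : String) : List (Int × Int) :=
  (PySem.List.pyRange 0 (PySem.Str.len input) 1).flatMap (fun j =>
    pvTableB.flatMap (fun wv => pvG input wv j))

lemma pvFlatMap_append_perm {α β : Type} (l : List α) (g h : α → List β) :
    (l.flatMap (fun a => g a ++ h a)).Perm (l.flatMap g ++ l.flatMap h) := by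
  induction l with
  | nil => simp
  | cons a l ih =>
    simp only [List.flatMap_cons]
    refine (ih.append_left (g a ++ h a)).trans ?_
    have h2 := ((List.perm_append_comm (l₁ := h a) (l₂ := l.flatMap g)).append_right
      (l.flatMap h)).append_left (g a)
    have e1 : (g a ++ h a) ++ (l.flatMap g ++ l.flatMap h)
        = g a ++ ((h a ++ l.flatMap g) ++ l.flatMap h) := by simp [List.append_assoc]
    have e2 : (g a ++ l.flatMap g) ++ (h a ++ l.flatMap h)
        = g a ++ ((l.flatMap g ++ h a) ++ l.flatMap h) := by simp [List.append_assoc]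
    rw [e1, e2]; exact h2

lemma pvFlatMap_swap_perm {α β γ : Type} (l₁ : List α) (l₂ : List β) (f : α → β → List γ) :
    (l₁.flatMap fun a => l₂.flatMap fun b => f a b).Perm
      (l₂.flatMap fun b => l₁.flatMap fun a => f a b) := by
  induction l₁ with
  | nil => simp
  | cons a l ih =>
    simp only [List.flatMap_cons]
    refine List.Perm.trans (ih.append_left _) ?_
    exact (pvFlatMap_append_perm l₂ (fun b => f a b) (fun b => l.flatMap fun a => f a b)).symm

-- no digit word is a prefix of a different digit word (their first two letters already differ)
lemma pvWords_prefix_unique :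
    ∀ a ∈ pvTableB, ∀ b ∈ pvTableB, a.1.toList <+: b.1.toList → a.1 = b.1 := by decide

lemma pvTable_pairwise_ne : pvTableB.Pairwise (fun a b => a.1 ≠ b.1) := by decide

lemma pvMem_pvG {input : String} {wv : String × Int} {j : Int} {x : Int × Int}
    (hx : x ∈ pvG input wv j) : x = (j, wv.2) := by
  unfold pvG at hx; split at hx <;> simp_all

lemma pvG_not_both (input : String) (j : Int) :
    pvTableB.Pairwise (fun a b => ∀ x ∈ pvG input a j, ∀ y ∈ pvG input b j, x.1 < y.1) := by
  refine pvTable_pairwise_ne.imp_of_mem ?_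
  intro a b ha hb hne x hx y hy
  exfalso
  unfold pvG at hx hy
  split at hx
  case isFalse => simp at hx
  case isTrue h1 =>
  split at hy
  case isFalse => simp at hy
  case isTrue h2 =>
  rw [PySem.Chars.startswith_iff] at h1 h2
  rcases List.prefix_or_prefix_of_prefix h1 h2 with h | h
  · exact hne (pvWords_prefix_unique a ha b hb h)
  · exact hne (pvWords_prefix_unique b hb a ha h).symm

lemma pvRow_pairwise (input : String) (j : Int) :
    (pvTableB.flatMap (fun wv => pvG input wv j)).Pairwise (fun p q => p.1 < q.1) := by
  rw [List.pairwise_flatMap]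
  refine ⟨fun a _ => ?_, pvG_not_both input j⟩
  unfold pvG; split <;> simp

lemma pvMem_row_fst {input : String} {j : Int} {x : Int × Int}
    (hx : x ∈ pvTableB.flatMap (fun wv => pvG input wv j)) : x.1 = j := by
  rw [List.mem_flatMap] at hx
  obtain ⟨wv, _, hx⟩ := hx
  rw [pvMem_pvG hx]

lemma pvPairsPos_pairwise (input : String) :
    (pvPairsPos input).Pairwise (fun p q => p.1 < q.1) := by
  unfold pvPairsPos
  rw [List.pairwise_flatMap]
  refine ⟨fun j _ => pvRow_pairwise input j, ?_⟩
  refine (PySem.List.pairwise_lt_pyRange_one 0 (PySem.Str.len input)).imp_of_mem ?_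
  intro j₁ j₂ _ _ hlt x hx y hy
  rw [pvMem_row_fst hx, pvMem_row_fst hy]; exact hlt

lemma pvSorted_hits (input : String) :
    PySem.List.sorted (pvHits input) (fun p => p.1) = pvPairsPos input := by
  refine PySem.List.sorted_eq_of_perm_of_pairwise_lt _ _ _ ?_ (pvPairsPos_pairwise input)
  exact pvFlatMap_swap_perm (PySem.List.pyRange 0 (PySem.Str.len input) 1) pvTableB
    (fun j wv => pvG input wv j)

lemma pvB_eq (input : String) :
    convert_to_num_alt input
      = (PySem.List.sorted (pvHits input) (fun p => p.1)).map (fun p => p.2) := rfl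

lemma pvFoldl_ite_append {α β : Type} (l : List α) (p : α → Prop) [DecidablePred p]
    (f : α → β) (acc : List β) :
    l.foldl (fun acc x => if p x then acc ++ [f x] else acc) acc
      = acc ++ l.flatMap (fun x => if p x then [f x] else []) := by
  induction l generalizing acc with
  | nil => simp
  | cons a l ih => simp only [List.foldl_cons, List.flatMap_cons]; split <;> simp [ih]

lemma pvCond_bridge (input : String) (w : String) (j : Int) (hj : 0 ≤ j) :
    (PySem.Str.slice input (some j) (some (j + PySem.Str.len w)) = w)
      ↔ PySem.Chars.startswith (input.toList.drop j.toNat) w.toList = true := by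
  rw [PySem.Chars.startswith_iff]
  have hlen : PySem.Str.len w = ((w.toList.length : Nat) : Int) := by
    simp [PySem.Str.len]
  have hj' : j = ((j.toNat : Nat) : Int) := (Int.toNat_of_nonneg hj).symm
  constructor
  · intro h
    have := congrArg String.toList h
    rw [PySem.Str.toList_slice] at this
    rw [PySem.Chars.slice_eq_listSlice, hj', hlen, PySem.List.slice_natCast_add] at this
    rw [List.prefix_iff_eq_take]
    exact this.symm
  · intro h
    rw [List.prefix_iff_eq_take] at h
    have : (PySem.Str.slice input (some j) (some (j + PySem.Str.len w))).toList = w.toList := by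
      rw [PySem.Str.toList_slice, PySem.Chars.slice_eq_listSlice, hj', hlen,
        PySem.List.slice_natCast_add]
      exact h.symm
    exact String.toList_injective this

lemma pvA_eq (input : String) :
    convert_to_num input
      = (PySem.List.pyRange 0 (PySem.Str.len input) 1).flatMap (fun j =>
          pvTableA.flatMap (fun iv =>
            if PySem.Str.slice input (some j) (some (j + PySem.Str.len iv.1)) = iv.1
            then [(PySem.Int.ofStr? iv.2).getD 0] else [])) := by
  unfold convert_to_num
  have hin : ∀ (ans : List Int) (j : Int),
      pvTableA.foldl
        (fun ans iv =>
          let l : Int := PySem.Str.len iv.1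
          if PySem.Str.slice input (some j) (some (j + l)) = iv.1
          then ans ++ [(PySem.Int.ofStr? iv.2).getD 0]
          else ans) ans
        = ans ++ pvTableA.flatMap (fun iv =>
            if PySem.Str.slice input (some j) (some (j + PySem.Str.len iv.1)) = iv.1
            then [(PySem.Int.ofStr? iv.2).getD 0] else []) := by
    intro ans j
    exact pvFoldl_ite_append pvTableA
      (fun iv => PySem.Str.slice input (some j) (some (j + PySem.Str.len iv.1)) = iv.1)
      (fun iv => (PySem.Int.ofStr? iv.2).getD 0) ans
  simp only [hin]
  rw [PySem.List.foldl_append_eq_flatMap]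
  simp

lemma pvTerm_eq (input : String) (j : Int) (hj : 0 ≤ j) (w : String) (vs : String) (vi : Int)
    (hv : (PySem.Int.ofStr? vs).getD 0 = vi) :
    (if PySem.Str.slice input (some j) (some (j + PySem.Str.len w)) = w
     then [(PySem.Int.ofStr? vs).getD 0] else ([] : List Int))
      = (pvG input (w, vi) j).map (fun p => p.2) := by
  unfold pvG
  rw [if_congr (pvCond_bridge input w j hj) (by rw [hv]) rfl]
  simp [apply_ite (List.map (fun (p : Int × Int) => p.2))]

lemma pvRow_eq (input : String) (j : Int) (hj : 0 ≤ j) :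
    pvTableA.flatMap (fun iv =>
        if PySem.Str.slice input (some j) (some (j + PySem.Str.len iv.1)) = iv.1
        then [(PySem.Int.ofStr? iv.2).getD 0] else [])
      = (pvTableB.flatMap (fun wv => pvG input wv j)).map (fun p => p.2) := by
  simp only [pvTableA, pvTableB, List.flatMap_cons, List.flatMap_nil, List.append_nil,
    List.map_append]
  rw [pvTerm_eq input j hj "one" "1" 1 (by decide), pvTerm_eq input j hj "two" "2" 2 (by decide),
    pvTerm_eq input j hj "three" "3" 3 (by decide), pvTerm_eq input j hj "four" "4" 4 (by decide),
    pvTerm_eq input j hj "five" "5" 5 (by decide), pvTerm_eq input j hj "six" "6" 6 (by decide),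
    pvTerm_eq input j hj "seven" "7" 7 (by decide), pvTerm_eq input j hj "eight" "8" 8 (by decide),
    pvTerm_eq input j hj "nine" "9" 9 (by decide)]

-- ===== VERDICT (by name: the statement is the Claim_ definition above) =====
theorem convert_to_num_spec : Claim_equal_convert_to_num := by
  intro input _
  unfold Spec_convert_to_num
  rw [pvA_eq, pvB_eq, pvSorted_hits]
  unfold pvPairsPos
  rw [List.map_flatMap]
  refine List.flatMap_congr ?_
  intro j hj
  exact pvRow_eq input j (PySem.List.mem_pyRange_one.mp hj).1
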